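-- pv_equiv track=rewrite | github.com/nerdysrisha/conf-ai-ms | src/services/document_processor_enhanced.py | _detect_document_type_from_filename
-- ===== SOURCE A (Python) =====
-- def _detect_document_type_from_filename(filename: str) -> str:
--     """
--     Détecte le type de document basé sur l'extension
--     """
--     if not filename:
--         return "auto"
--
--     filename_lower = filename.lower()
--
--     # Mappings d'extensions vers types de documents
--     type_mappings = {
--         'legal': ['.pdf', '.doc', '.docx'] if any(keyword in filename_lower for keyword in
--                  ['contrat', 'contract', 'legal', 'terme', 'condition', 'policy']) else [],
--         'technical': ['.pdf', '.doc', '.docx'] if any(keyword in filename_lower for keyword in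
--                      ['manual', 'guide', 'spec', 'documentation', 'readme']) else [],
--         'code': ['.py', '.js', '.java', '.cpp', '.cs', '.php', '.rb', '.go'],
--         'narrative': ['.txt', '.md', '.rtf']
--     }
--
--     # Vérifier l'extension
--     extension = '.' + filename_lower.split('.')[-1] if '.' in filename else ''
--
--     for doc_type, extensions in type_mappings.items():
--         if extension in extensions:
--             return doc_type
--
--     return "auto"
-- ===== SOURCE B (Python) =====
-- _EXT_MAP = {
--     '.py': 'code', '.js': 'code', '.java': 'code', '.cpp': 'code',
--     '.cs': 'code', '.php': 'code', '.rb': 'code', '.go': 'code',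
--     '.txt': 'narrative', '.md': 'narrative', '.rtf': 'narrative',
-- }
--
-- _LEGAL_KWS = ('contrat', 'contract', 'legal', 'terme', 'condition', 'policy')
-- _TECH_KWS = ('manual', 'guide', 'spec', 'documentation', 'readme')
--
--
-- def _detect_document_type_from_filename(filename: str) -> str:
--     if not filename:
--         return "auto"
--     filename_lower = filename.lower()
--     extension = '.' + filename_lower.split('.')[-1] if '.' in filename else ''
--     if extension in ('.pdf', '.doc', '.docx'):
--         if any(k in filename_lower for k in _LEGAL_KWS):
--             return 'legal'
--         if any(k in filename_lower for k in _TECH_KWS):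
--             return 'technical'
--         return 'auto'
--     return _EXT_MAP.get(extension, 'auto')
-- ===== Notes on version B (the rewrite author's own statement) =====
-- stated objective: simpler
-- what changed: Replaces A's keyword-gated extension-list dict rebuilt on every call and scanned pair-by-pair with an up-front branch on the extension: pdf/doc/docx go through the legal-then-technical keyword chain, all other extensions through one static extension-to-type lookup.
import Mathlib
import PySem

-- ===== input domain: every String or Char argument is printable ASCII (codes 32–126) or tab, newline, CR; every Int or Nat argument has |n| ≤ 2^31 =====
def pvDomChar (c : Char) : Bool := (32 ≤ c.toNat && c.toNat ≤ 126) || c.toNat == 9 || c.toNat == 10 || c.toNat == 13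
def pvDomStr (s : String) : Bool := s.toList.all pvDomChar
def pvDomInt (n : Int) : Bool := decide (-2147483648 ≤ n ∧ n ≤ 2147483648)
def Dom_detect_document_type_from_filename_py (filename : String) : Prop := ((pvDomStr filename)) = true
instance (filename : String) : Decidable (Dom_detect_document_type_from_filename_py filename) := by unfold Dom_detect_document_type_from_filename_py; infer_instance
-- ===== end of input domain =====

-- B replaces A's keyword-gated extension lists (a dict rebuilt per call and scanned in order)
-- with an up-front branch on the extension plus one static extension→type lookup (objective: simpler).

-- ===== PORT A =====
-- the 'for doc_type, extensions in type_mappings.items():' loop (first match wins, else fall through)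
def pvLoopA : List (String × List String) → String → String
  | [], _ => "auto"
  | (docType, exts) :: rest, ext => if exts.contains ext then docType else pvLoopA rest ext

def detect_document_type_from_filename_py (filename : String) : String :=
  if filename = "" then "auto"
  else
    let filename_lower := PySem.Str.lower filename
    let legal_exts : List String :=
      if ["contrat", "contract", "legal", "terme", "condition", "policy"].any
           (fun k => PySem.Str.isIn k filename_lower)
      then [".pdf", ".doc", ".docx"] else []
    let tech_exts : List String :=
      if ["manual", "guide", "spec", "documentation", "readme"].any
           (fun k => PySem.Str.isIn k filename_lower)
      then [".pdf", ".doc", ".docx"] else []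
    let type_mappings : List (String × List String) :=
      [("legal", legal_exts), ("technical", tech_exts),
       ("code", [".py", ".js", ".java", ".cpp", ".cs", ".php", ".rb", ".go"]),
       ("narrative", [".txt", ".md", ".rtf"])]
    -- split('.')[-1] on a nonempty split list: pyGet? (-1) is always some here, getD is exact
    let extension :=
      if PySem.Str.isIn "." filename then
        String.ofList ('.' :: ((PySem.List.pyGet? ((PySem.Str.split? filename_lower ".").getD []) (-1)).getD "").toList)
      else ""
    pvLoopA type_mappings extension

-- ===== PORT B =====
def pvExtMap : PySem.Dict String String :=
  PySem.Dict.ofList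
    [(".py", "code"), (".js", "code"), (".java", "code"), (".cpp", "code"),
     (".cs", "code"), (".php", "code"), (".rb", "code"), (".go", "code"),
     (".txt", "narrative"), (".md", "narrative"), (".rtf", "narrative")]

def detect_document_type_from_filename_py_alt (filename : String) : String :=
  if filename = "" then "auto"
  else
    let filename_lower := PySem.Str.lower filename
    let extension :=
      if PySem.Str.isIn "." filename then
        String.ofList ('.' :: ((PySem.List.pyGet? ((PySem.Str.split? filename_lower ".").getD []) (-1)).getD "").toList)
      else ""
    if [".pdf", ".doc", ".docx"].contains extension then
      if ["contrat", "contract", "legal", "terme", "condition", "policy"].any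
           (fun k => PySem.Str.isIn k filename_lower) then "legal"
      else if ["manual", "guide", "spec", "documentation", "readme"].any
           (fun k => PySem.Str.isIn k filename_lower) then "technical"
      else "auto"
    else pvExtMap.getD extension "auto"

-- ===== PRECONDITION & SPEC =====
def Spec_detect_document_type_from_filename_py (filename : String) (out : String) : Prop := out = detect_document_type_from_filename_py_alt filename
instance (filename : String) (out : String) : Decidable (Spec_detect_document_type_from_filename_py filename out) := by unfold Spec_detect_document_type_from_filename_py; infer_instance

-- ===== CLAIM (what is proved, stated in full; the proofs are below) =====
def Claim_equal_detect_document_type_from_filename_py : Prop := ∀ (filename : String), Dom_detect_document_type_from_filename_py filename → Spec_detect_document_type_from_filename_py filename (detect_document_type_from_filename_py filename)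

-- ===== LEMMAS AND PROOFS =====

-- the core case analysis: for any extension string e and the two keyword booleans,
-- A's ordered scan of the four (type, extensions) pairs equals B's branch structure
lemma pvKey (e : String) (b1 b2 : Bool) :
    pvLoopA
      [("legal", if b1 then [".pdf", ".doc", ".docx"] else []),
       ("technical", if b2 then [".pdf", ".doc", ".docx"] else []),
       ("code", [".py", ".js", ".java", ".cpp", ".cs", ".php", ".rb", ".go"]),
       ("narrative", [".txt", ".md", ".rtf"])] e
    = if [".pdf", ".doc", ".docx"].contains e then
        (if b1 then "legal" else if b2 then "technical" else "auto")
      else pvExtMap.getD e "auto" := by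
  by_cases h1 : e = ".pdf"; · subst h1; cases b1 <;> cases b2 <;> decide
  by_cases h2 : e = ".doc"; · subst h2; cases b1 <;> cases b2 <;> decide
  by_cases h3 : e = ".docx"; · subst h3; cases b1 <;> cases b2 <;> decide
  by_cases h4 : e = ".py"; · subst h4; cases b1 <;> cases b2 <;> decide
  by_cases h5 : e = ".js"; · subst h5; cases b1 <;> cases b2 <;> decide
  by_cases h6 : e = ".java"; · subst h6; cases b1 <;> cases b2 <;> decide
  by_cases h7 : e = ".cpp"; · subst h7; cases b1 <;> cases b2 <;> decide
  by_cases h8 : e = ".cs"; · subst h8; cases b1 <;> cases b2 <;> decide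
  by_cases h9 : e = ".php"; · subst h9; cases b1 <;> cases b2 <;> decide
  by_cases h10 : e = ".rb"; · subst h10; cases b1 <;> cases b2 <;> decide
  by_cases h11 : e = ".go"; · subst h11; cases b1 <;> cases b2 <;> decide
  by_cases h12 : e = ".txt"; · subst h12; cases b1 <;> cases b2 <;> decide
  by_cases h13 : e = ".md"; · subst h13; cases b1 <;> cases b2 <;> decide
  by_cases h14 : e = ".rtf"; · subst h14; cases b1 <;> cases b2 <;> decide
  -- e matches no listed extension: both sides fall through to "auto"
  have hitems : pvExtMap.items =
      [(".py", "code"), (".js", "code"), (".java", "code"), (".cpp", "code"),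
       (".cs", "code"), (".php", "code"), (".rb", "code"), (".go", "code"),
       (".txt", "narrative"), (".md", "narrative"), (".rtf", "narrative")] := by decide
  have g1 : (".pdf" == e) = false := beq_eq_false_iff_ne.mpr (Ne.symm h1)
  have g2 : (".doc" == e) = false := beq_eq_false_iff_ne.mpr (Ne.symm h2)
  have g3 : (".docx" == e) = false := beq_eq_false_iff_ne.mpr (Ne.symm h3)
  have g4 : (".py" == e) = false := beq_eq_false_iff_ne.mpr (Ne.symm h4)
  have g5 : (".js" == e) = false := beq_eq_false_iff_ne.mpr (Ne.symm h5)
  have g6 : (".java" == e) = false := beq_eq_false_iff_ne.mpr (Ne.symm h6)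
  have g7 : (".cpp" == e) = false := beq_eq_false_iff_ne.mpr (Ne.symm h7)
  have g8 : (".cs" == e) = false := beq_eq_false_iff_ne.mpr (Ne.symm h8)
  have g9 : (".php" == e) = false := beq_eq_false_iff_ne.mpr (Ne.symm h9)
  have g10 : (".rb" == e) = false := beq_eq_false_iff_ne.mpr (Ne.symm h10)
  have g11 : (".go" == e) = false := beq_eq_false_iff_ne.mpr (Ne.symm h11)
  have g12 : (".txt" == e) = false := beq_eq_false_iff_ne.mpr (Ne.symm h12)
  have g13 : (".md" == e) = false := beq_eq_false_iff_ne.mpr (Ne.symm h13)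
  have g14 : (".rtf" == e) = false := beq_eq_false_iff_ne.mpr (Ne.symm h14)
  cases b1 <;> cases b2 <;>
    simp [pvLoopA, hitems, PySem.Dict.getD, PySem.Dict.get?, List.find?,
      h1, h2, h3, h4, h5, h6, h7, h8, h9, h10, h11, h12, h13, h14,
      g1, g2, g3, g4, g5, g6, g7, g8, g9, g10, g11, g12, g13, g14]

-- ===== VERDICT (by name: the statement is the Claim_ definition above) =====
theorem detect_document_type_from_filename_py_spec : Claim_equal_detect_document_type_from_filename_py := by
  intro filename _
  unfold Spec_detect_document_type_from_filename_py
  rw [detect_document_type_from_filename_py, detect_document_type_from_filename_py_alt]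
  by_cases hf : filename = ""
  · rw [if_pos hf, if_pos hf]
  · rw [if_neg hf, if_neg hf]
    exact pvKey _ _ _
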